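-- pv_equiv track=rewrite | github.com/a-gavriel/Intro-Taller | Otros-Ejercicios/suma_par_impar_pila.py | suma_par_aux
-- ===== SOURCE A (Python) =====
-- def suma_par_aux(num):
--     if num==0:
--         return 0
--     else:
--         if num%2==0:
--             return num%10 + suma_par_aux(num//10)
--         else:
--             return suma_par_aux(num//10)
-- ===== SOURCE B (Python) =====
-- def suma_par_aux(num):
--     digits = []
--     while num != 0:
--         digits.append(num % 10)
--         num //= 10
--     return sum(d for d in digits if d % 2 == 0)
-- ===== Notes on version B (the rewrite author's own statement) =====
-- stated objective: alternative
-- what changed: Replaces A's single recursion that tests parity and accumulates as it goes with two staged passes: a loop that extracts the full digit list, then a filter-and-sum over that list testing each digit's own parity.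
import Mathlib
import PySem

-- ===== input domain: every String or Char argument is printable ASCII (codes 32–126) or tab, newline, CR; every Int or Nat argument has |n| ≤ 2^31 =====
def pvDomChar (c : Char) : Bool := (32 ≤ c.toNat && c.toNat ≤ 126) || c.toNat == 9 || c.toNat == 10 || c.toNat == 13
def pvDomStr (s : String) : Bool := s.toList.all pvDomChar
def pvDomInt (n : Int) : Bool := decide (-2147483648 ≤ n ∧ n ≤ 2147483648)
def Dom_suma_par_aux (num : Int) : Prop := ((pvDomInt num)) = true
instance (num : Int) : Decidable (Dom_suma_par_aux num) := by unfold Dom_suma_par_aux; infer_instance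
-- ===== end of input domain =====

-- B restructures A as two staged passes (extract the digit list, then filter-and-sum the even digits); alternative decomposition, same cost.
-- Both ports carry a fuel parameter (num.natAbs + 1) only to be total in Lean; on num ≥ 0 the fuel never runs out.

-- ===== PORT A =====
-- literal port of A's recursion (fuel guard for totality only)
def sumaA (fuel : Nat) (num : Int) : Int :=
  match fuel with
  | 0 => 0
  | f + 1 =>
    if num = 0 then 0
    else if PySem.Int.mod num 2 = 0 then
      PySem.Int.mod num 10 + sumaA f (PySem.Int.floordiv num 10)
    else
      sumaA f (PySem.Int.floordiv num 10)

def suma_par_aux (num : Int) : Int := sumaA (num.natAbs + 1) num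

-- ===== PORT B =====
-- pass 1 of Source B: the while-loop appending num % 10 to `digits` (append = snoc, as in Python)
def digitsB (fuel : Nat) (num : Int) (acc : List Int) : List Int :=
  match fuel with
  | 0 => acc
  | f + 1 =>
    if num = 0 then acc
    else digitsB f (PySem.Int.floordiv num 10) (acc ++ [PySem.Int.mod num 10])

-- pass 2 of Source B: sum(d for d in digits if d % 2 == 0)
def suma_par_aux_alt (num : Int) : Int :=
  ((digitsB (num.natAbs + 1) num []).filter (fun d => PySem.Int.mod d 2 = 0)).sum

-- ===== PRECONDITION & SPEC =====
-- Pre_ excludes negative num: Python A overflows the recursion stack (RecursionError) and B's loop never terminates there.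
def Pre_suma_par_aux (num : Int) : Prop := 0 ≤ num
instance (num : Int) : Decidable (Pre_suma_par_aux num) := by unfold Pre_suma_par_aux; infer_instance
def pvWitness_suma_par_aux : Int := 2468
def Spec_suma_par_aux (num : Int) (out : Int) : Prop := out = suma_par_aux_alt num
instance (num : Int) (out : Int) : Decidable (Spec_suma_par_aux num out) := by unfold Spec_suma_par_aux; infer_instance

-- ===== CLAIM (what is proved, stated in full; the proofs are below) =====
def Claim_equal_suma_par_aux : Prop := ∀ (num : Int), Dom_suma_par_aux num → Pre_suma_par_aux num → Spec_suma_par_aux num (suma_par_aux num)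

-- ===== LEMMAS AND PROOFS =====
-- The last digit has the parity of the whole number: (num % 10) % 2 = num % 2 (PySem.Int.mod with positive divisor is Int.emod).
theorem mod10_parity (num : Int) :
    PySem.Int.mod (PySem.Int.mod num 10) 2 = PySem.Int.mod num 2 := by
  rw [PySem.Int.mod_eq_emod_of_pos (by norm_num), PySem.Int.mod_eq_emod_of_pos (by norm_num),
      PySem.Int.mod_eq_emod_of_pos (by norm_num)]
  exact Int.emod_emod_of_dvd num (by norm_num)

-- The accumulated digit list's filtered sum is the accumulator's part plus A's recursive value, for equal fuel.
theorem filter_sum_digitsB (fuel : Nat) :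
    ∀ (num : Int) (acc : List Int),
      ((digitsB fuel num acc).filter (fun d => PySem.Int.mod d 2 = 0)).sum
        = (acc.filter (fun d => PySem.Int.mod d 2 = 0)).sum + sumaA fuel num := by
  induction fuel with
  | zero => intro num acc; simp [digitsB, sumaA]
  | succ f ih =>
    intro num acc
    simp only [digitsB, sumaA]
    by_cases h0 : num = 0
    · simp [h0]
    · simp only [if_neg h0]
      rw [ih]
      rw [List.filter_append, List.sum_append]
      by_cases he : PySem.Int.mod num 2 = 0
      · rw [if_pos he]
        have hd : PySem.Int.mod (PySem.Int.mod num 10) 2 = 0 := by rw [mod10_parity]; exact he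
        rw [List.filter_singleton, decide_eq_true hd]
        simp only [cond_true, List.sum_cons, List.sum_nil]
        ring
      · rw [if_neg he]
        have hd : ¬ PySem.Int.mod (PySem.Int.mod num 10) 2 = 0 := by rw [mod10_parity]; exact he
        rw [List.filter_singleton, decide_eq_false hd]
        simp

-- ===== VERDICT (by name: the statement is the Claim_ definition above) =====
theorem suma_par_aux_spec : Claim_equal_suma_par_aux := by
  intro num _ _
  unfold Spec_suma_par_aux suma_par_aux suma_par_aux_alt
  rw [filter_sum_digitsB]
  simp
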